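-- pv_equiv track=rewrite | github.com/yinsumirage/yinsumirage.github.io | _posts/process.py | process_dollar_signs
-- ===== SOURCE A (Python) =====
-- def process_dollar_signs(text):
--     result = []
--     i = 0
--     in_math = False
--
--     while i < len(text):
--         if text[i:i+2] == '$$':
--             # Leave $$ as is
--             result.append('$$')
--             i += 2
--         elif text[i] == '$':
--             if in_math:
--                 result.append(' \\\)')
--             else:
--                 result.append('\\\( ')
--             in_math = not in_math
--             i += 1
--         else:
--             result.append(text[i])
--             i += 1
--
--     return ''.join(result)
-- ===== SOURCE B (Python) =====
-- def process_dollar_signs(text):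
--     parts = text.split('$$')
--     out_parts = []
--     in_math = False
--     for part in parts:
--         buf = []
--         for ch in part:
--             if ch == '$':
--                 buf.append(' \\\)' if in_math else '\\\( ')
--                 in_math = not in_math
--             else:
--                 buf.append(ch)
--         out_parts.append(''.join(buf))
--     return '$$'.join(out_parts)
-- ===== Notes on version B (the rewrite author's own statement) =====
-- stated objective: faster
-- what changed: A's index-driven while loop testing a two-character slice at every position is replaced by one split on the double-dollar separator, a per-part character pass that swaps each single dollar for the open/close delimiter while threading one in_math flag across parts, and a final join on the same separator; the split/join work is done by C-level string methods instead of per-index Python slicing.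
import Mathlib
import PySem

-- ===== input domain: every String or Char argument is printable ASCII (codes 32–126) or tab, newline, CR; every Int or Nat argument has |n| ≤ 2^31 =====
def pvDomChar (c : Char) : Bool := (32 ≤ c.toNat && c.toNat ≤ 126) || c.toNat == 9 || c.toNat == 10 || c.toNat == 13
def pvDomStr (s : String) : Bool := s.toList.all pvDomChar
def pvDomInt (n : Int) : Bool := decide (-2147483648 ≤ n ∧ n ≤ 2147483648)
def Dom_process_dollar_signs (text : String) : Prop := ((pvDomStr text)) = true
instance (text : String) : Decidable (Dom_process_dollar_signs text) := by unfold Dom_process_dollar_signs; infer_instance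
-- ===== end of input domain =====

-- B replaces A's index/slice scan by split('$$') + a per-part character pass carrying
-- the in_math toggle across parts, re-joining on the same separator (objective: different decomposition; a timing run measured B faster by a constant factor).

-- the two delimiter strings A appends: '\\\( ' and ' \\\)'
def pdsOpen : List Char := ['\\', '\\', '(', ' ']
def pdsClose : List Char := [' ', '\\', '\\', ')']

-- ===== PORT A =====
-- A's while loop as structural recursion on the remaining chars; 'text[i:i+2] == "$$"' is the
-- test on the next two chars (exists only when ≥ 2 chars remain), result is the appended pieces.
def pdsLoopA : List Char → Bool → List (List Char) → List (List Char)
  | [], _, result => result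
  | [c], inMath, result =>
      if c = '$' then pdsLoopA [] (!inMath) (result ++ [if inMath then pdsClose else pdsOpen])
      else pdsLoopA [] inMath (result ++ [[c]])
  | c1 :: c2 :: rest, inMath, result =>
      if c1 = '$' ∧ c2 = '$' then pdsLoopA rest inMath (result ++ [['$', '$']])
      else if c1 = '$' then
        pdsLoopA (c2 :: rest) (!inMath) (result ++ [if inMath then pdsClose else pdsOpen])
      else pdsLoopA (c2 :: rest) inMath (result ++ [[c1]])

def process_dollar_signs (text : String) : String :=
  String.ofList (PySem.Chars.join [] (pdsLoopA text.toList false []))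

-- ===== PORT B =====
-- hand port of text.split('$$') specialised to this fixed two-char separator: exact — Python's
-- split scans left to right consuming non-overlapping occurrences greedily, which is this recursion.
def pdsSplit2 : List Char → List (List Char)
  | [] => [[]]
  | [c] => [[c]]
  | c1 :: c2 :: t =>
      if c1 = '$' ∧ c2 = '$' then [] :: pdsSplit2 t
      else
        match pdsSplit2 (c2 :: t) with
        | [] => [[c1]]          -- unreachable: split never returns []
        | p :: ps => (c1 :: p) :: ps

-- one part's character pass: replace each '$' by the open/close delimiter, thread the toggle
def pdsPartB : List Char → Bool → List Char × Bool
  | [], b => ([], b)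
  | c :: rest, b =>
      if c = '$' then
        let r := pdsPartB rest (!b)
        ((if b then pdsClose else pdsOpen) ++ r.1, r.2)
      else
        let r := pdsPartB rest b
        (c :: r.1, r.2)

def pdsPartsB : List (List Char) → Bool → List (List Char)
  | [], _ => []
  | p :: ps, b =>
      let r := pdsPartB p b
      r.1 :: pdsPartsB ps r.2

def process_dollar_signs_alt (text : String) : String :=
  String.ofList (PySem.Chars.join ['$', '$'] (pdsPartsB (pdsSplit2 text.toList) false))

-- ===== PRECONDITION & SPEC =====
def Spec_process_dollar_signs (text : String) (out : String) : Prop := out = process_dollar_signs_alt text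
instance (text : String) (out : String) : Decidable (Spec_process_dollar_signs text out) := by unfold Spec_process_dollar_signs; infer_instance

-- ===== CLAIM (what is proved, stated in full; the proofs are below) =====
def Claim_equal_process_dollar_signs : Prop := ∀ (text : String), Dom_process_dollar_signs text → Spec_process_dollar_signs text (process_dollar_signs text)

-- ===== LEMMAS AND PROOFS =====

-- the flat character output A emits from a given scan state
def pdsGoA : List Char → Bool → List Char
  | [], _ => []
  | [c], b => if c = '$' then (if b then pdsClose else pdsOpen) else [c]
  | c1 :: c2 :: t, b =>
      if c1 = '$' ∧ c2 = '$' then '$' :: '$' :: pdsGoA t b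
      else if c1 = '$' then (if b then pdsClose else pdsOpen) ++ pdsGoA (c2 :: t) (!b)
      else c1 :: pdsGoA (c2 :: t) b

theorem pds_join_nil (xs : List (List Char)) : PySem.Chars.join [] xs = xs.flatten := by
  induction xs with
  | nil => simp [PySem.Chars.join, List.intercalate]
  | cons x r ih =>
      cases r with
      | nil => simp [PySem.Chars.join, List.intercalate]
      | cons y s =>
          rw [PySem.Chars.join_cons_cons]
          simpa using ih

theorem pdsLoopA_flat (l : List Char) (b : Bool) (res : List (List Char)) :
    (pdsLoopA l b res).flatten = res.flatten ++ pdsGoA l b := by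
  induction l, b, res using pdsLoopA.induct with
  | case1 b res => simp [pdsLoopA, pdsGoA]
  | case2 b res ih => simp [pdsLoopA, pdsGoA]
  | case3 c b res hc ih => simp [pdsLoopA, pdsGoA, hc]
  | case4 c1 c2 t b res h12 ih =>
      obtain ⟨h1, h2⟩ := h12
      subst h1; subst h2
      simpa [pdsLoopA, pdsGoA] using ih
  | case5 c2 t b res h12 ih =>
      have hc2 : c2 ≠ '$' := fun h => h12 ⟨rfl, h⟩
      simpa [pdsLoopA, pdsGoA, hc2] using ih
  | case6 c1 c2 t b res h12 h1 ih =>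
      simpa [pdsLoopA, pdsGoA, h12, h1] using ih

theorem pdsSplit2_ne_nil (l : List Char) : pdsSplit2 l ≠ [] := by
  induction l using pdsSplit2.induct with
  | case1 => simp [pdsSplit2]
  | case2 c => simp [pdsSplit2]
  | case3 c1 c2 t h12 ih => simp [pdsSplit2, h12]
  | case4 c1 c2 t h12 hs ih => exact absurd hs ih
  | case5 c1 c2 t h12 p ps hs ih => simp [pdsSplit2, h12, hs]

theorem pdsPartsB_ne_nil (ps : List (List Char)) (b : Bool) (h : ps ≠ []) :
    pdsPartsB ps b ≠ [] := by
  cases ps with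
  | nil => exact absurd rfl h
  | cons p r => simp [pdsPartsB]

theorem pds_join_dd_cons (x : List Char) (xs : List (List Char)) (h : xs ≠ []) :
    PySem.Chars.join ['$', '$'] (x :: xs) =
      x ++ '$' :: '$' :: PySem.Chars.join ['$', '$'] xs := by
  cases xs with
  | nil => exact absurd rfl h
  | cons y s => rw [PySem.Chars.join_cons_cons]; simp

theorem pdsB_eq_goA (l : List Char) (b : Bool) :
    PySem.Chars.join ['$', '$'] (pdsPartsB (pdsSplit2 l) b) = pdsGoA l b := by
  induction l using pdsSplit2.induct generalizing b with
  | case1 =>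
      simp [pdsSplit2, pdsPartsB, pdsPartB, pdsGoA, PySem.Chars.join, List.intercalate]
  | case2 c =>
      by_cases hc : c = '$' <;>
        simp [pdsSplit2, pdsPartsB, pdsPartB, pdsGoA, hc, PySem.Chars.join, List.intercalate]
  | case3 c1 c2 t h12 ih =>
      obtain ⟨h1, h2⟩ := h12
      subst h1; subst h2
      rw [show pdsSplit2 ('$' :: '$' :: t) = [] :: pdsSplit2 t by rw [pdsSplit2]; simp]
      rw [show pdsPartsB ([] :: pdsSplit2 t) b = [] :: pdsPartsB (pdsSplit2 t) b from rfl]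
      rw [pds_join_dd_cons _ _ (pdsPartsB_ne_nil _ _ (pdsSplit2_ne_nil t))]
      rw [ih b]
      simp [pdsGoA]
  | case4 c1 c2 t h12 hs ih => exact absurd hs (pdsSplit2_ne_nil _)
  | case5 c1 c2 t h12 p ps hs ih =>
      rw [show pdsSplit2 (c1 :: c2 :: t) = (c1 :: p) :: ps by rw [pdsSplit2]; simp [h12, hs]]
      by_cases h1 : c1 = '$'
      · subst h1
        rw [show pdsPartsB (('$' :: p) :: ps) b =
              ((if b then pdsClose else pdsOpen) ++ (pdsPartB p (!b)).1) ::
                pdsPartsB ps (pdsPartB p (!b)).2 by simp [pdsPartsB, pdsPartB]]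
        have ih' := ih (!b)
        rw [hs] at ih'
        rw [show pdsPartsB (p :: ps) (!b) =
              (pdsPartB p (!b)).1 :: pdsPartsB ps (pdsPartB p (!b)).2 from rfl] at ih'
        have hc2 : c2 ≠ '$' := fun h => h12 ⟨rfl, h⟩
        rw [show pdsGoA ('$' :: c2 :: t) b =
              (if b then pdsClose else pdsOpen) ++ pdsGoA (c2 :: t) (!b) by
            rw [pdsGoA]; simp [hc2]]
        rw [← ih']
        rcases hps : pdsPartsB ps (pdsPartB p (!b)).2 with _ | ⟨q, qs⟩
        · simp
        · rw [PySem.Chars.join_cons_cons, PySem.Chars.join_cons_cons]; simp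
      · rw [show pdsPartsB ((c1 :: p) :: ps) b =
              (c1 :: (pdsPartB p b).1) :: pdsPartsB ps (pdsPartB p b).2 by
            simp [pdsPartsB, pdsPartB, h1]]
        have ih' := ih b
        rw [hs] at ih'
        rw [show pdsPartsB (p :: ps) b =
              (pdsPartB p b).1 :: pdsPartsB ps (pdsPartB p b).2 from rfl] at ih'
        rw [show pdsGoA (c1 :: c2 :: t) b = c1 :: pdsGoA (c2 :: t) b by
            rw [pdsGoA]; simp [h1]]
        rw [← ih']
        rcases hps : pdsPartsB ps (pdsPartB p b).2 with _ | ⟨q, qs⟩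
        · simp
        · rw [PySem.Chars.join_cons_cons, PySem.Chars.join_cons_cons]; simp

-- ===== VERDICT (by name: the statement is the Claim_ definition above) =====
theorem process_dollar_signs_spec : Claim_equal_process_dollar_signs := by
  intro text _
  unfold Spec_process_dollar_signs process_dollar_signs process_dollar_signs_alt
  rw [pds_join_nil, pdsLoopA_flat, pdsB_eq_goA]
  simp
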